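-- pv_equiv track=rewrite | github.com/toycenterboss-bot/mgts-b2b | scripts/penpot/setup_penpot_structure.py | parse_component_list
-- ===== SOURCE A (Python) =====
-- def normalize_note_text(note_text):
--     if not note_text:
--         return ""
--     prefix = "Components:"
--     if note_text.startswith(prefix):
--         return note_text[len(prefix) :].strip()
--     return note_text
--
-- def parse_component_list(note_text):
--     if not note_text:
--         return []
--     text = normalize_note_text(note_text)
--     parts = []
--     for chunk in text.split(","):
--         chunk = chunk.strip()
--         if not chunk:
--             continue
--         parts.extend([part.strip() for part in chunk.split("+") if part.strip()])
--     return parts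
-- ===== SOURCE B (Python) =====
-- def normalize_note_text(note_text):
--     if not note_text:
--         return ""
--     prefix = "Components:"
--     if note_text.startswith(prefix):
--         return note_text[len(prefix) :].strip()
--     return note_text
--
-- def parse_component_list(note_text):
--     # One linear pass: accumulate characters into the current token and
--     # flush it (stripped, if non-empty) at every ',' or '+' and at the end.
--     if not note_text:
--         return []
--     text = normalize_note_text(note_text)
--     parts = []
--     token = []
--     for ch in text:
--         if ch == "," or ch == "+":
--             word = "".join(token).strip()
--             if word:
--                 parts.append(word)
--             token = []
--         else:
--             token.append(ch)
--     word = "".join(token).strip()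
--     if word:
--         parts.append(word)
--     return parts
-- ===== Notes on version B (the rewrite author's own statement) =====
-- stated objective: alternative
-- what changed: Replaces the nested two-level pass (outer comma split with an inner plus split per chunk) by a single linear character scan that accumulates the current token and flushes it (stripped, if non-empty) at each delimiter and at the end.
import Mathlib
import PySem

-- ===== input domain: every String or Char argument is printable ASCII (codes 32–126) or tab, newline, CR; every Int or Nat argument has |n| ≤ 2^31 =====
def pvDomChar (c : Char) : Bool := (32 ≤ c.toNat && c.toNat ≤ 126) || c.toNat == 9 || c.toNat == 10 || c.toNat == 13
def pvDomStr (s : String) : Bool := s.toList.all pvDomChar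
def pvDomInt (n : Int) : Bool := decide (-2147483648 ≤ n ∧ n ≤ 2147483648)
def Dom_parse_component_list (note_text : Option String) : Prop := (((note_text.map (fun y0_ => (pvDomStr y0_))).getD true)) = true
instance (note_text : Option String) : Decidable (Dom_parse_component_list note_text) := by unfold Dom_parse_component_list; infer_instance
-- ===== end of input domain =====

-- B is an alternative single-pass tokenizer (same cost): it replaces A's split(',')
-- loop with an inner split('+') by one character scan with an accumulated token.

-- ===== PORT A =====
-- s.split(sep) for a non-empty literal sep (here "," and "+"); exact: PySem.Chars.splitOn
def pySplit (s sep : String) : List String :=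
  (PySem.Chars.splitOn s.toList sep.toList).map String.ofList

def normalize_note_text (note_text : Option String) : String :=
  match note_text with
  | none => ""
  | some s =>
    if s = "" then ""
    else if PySem.Str.startswith s "Components:" then
      PySem.Str.strip (PySem.Str.slice s (some (PySem.Str.len "Components:")) none)
    else s

def parse_component_list (note_text : Option String) : List String :=
  match note_text with
  | none => []
  | some s =>
    if s = "" then []
    else
      let text := normalize_note_text note_text
      (pySplit text ",").foldl
        (fun parts chunk =>
          let c := PySem.Str.strip chunk
          if c = "" then parts
          else parts ++ (((pySplit c "+").map PySem.Str.strip).filter (fun p => p ≠ "")))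
        []

-- ===== PORT B =====
def pvFlush (parts : List String) (token : List Char) : List String :=
  let word := PySem.Chars.strip token
  if word = [] then parts else parts ++ [String.ofList word]

def pvStep (st : List String × List Char) (ch : Char) : List String × List Char :=
  if ch = ',' ∨ ch = '+' then (pvFlush st.1 st.2, []) else (st.1, st.2 ++ [ch])

def parse_component_list_alt (note_text : Option String) : List String :=
  match note_text with
  | none => []
  | some s =>
    if s = "" then []
    else
      let text := normalize_note_text note_text
      let st := text.toList.foldl pvStep ([], [])
      pvFlush st.1 st.2

-- ===== PRECONDITION & SPEC =====
def Spec_parse_component_list (note_text : Option String) (out : List String) : Prop := out = parse_component_list_alt note_text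
instance (note_text : Option String) (out : List String) : Decidable (Spec_parse_component_list note_text out) := by unfold Spec_parse_component_list; infer_instance

-- ===== CLAIM (what is proved, stated in full; the proofs are below) =====
def Claim_equal_parse_component_list : Prop := ∀ (note_text : Option String), Dom_parse_component_list note_text → Spec_parse_component_list note_text (parse_component_list note_text)

-- ===== LEMMAS AND PROOFS =====

-- delimiter predicate and a structural single-character splitter (proof-side model)
def pvIsDelim (c : Char) : Bool := c = ',' || c = '+'

def pvSplits (d : Char) : List Char → List (List Char)
  | [] => [[]]
  | c :: s => if c = d then [] :: pvSplits d s else (pvSplits d s).modifyHead (c :: ·)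

def pvSplitsP : List Char → List (List Char)
  | [] => [[]]
  | c :: s => if pvIsDelim c then [] :: pvSplitsP s else (pvSplitsP s).modifyHead (c :: ·)

def pvFilterStrip (l : List (List Char)) : List String :=
  ((l.map PySem.Chars.strip).filter (fun p => p ≠ [])).map String.ofList

theorem pvSplits_ne_nil (d : Char) (s : List Char) : pvSplits d s ≠ [] := by
  induction s with
  | nil => simp [pvSplits]
  | cons c s ih =>
    simp only [pvSplits]
    split_ifs
    · simp
    · cases h : pvSplits d s with
      | nil => exact absurd h ih
      | cons a t => simp [List.modifyHead]

-- Chars.splitOn with a single-character separator is the structural splitter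
theorem splitOn_go_single (d : Char) (fuel : Nat) :
    ∀ (l cur : List Char) (accs : List (List Char)), l.length < fuel →
      PySem.Chars.splitOn.go [d] fuel l cur accs
        = accs.reverse ++ (pvSplits d l).modifyHead (cur.reverse ++ ·) := by
  induction fuel with
  | zero => intro l cur accs h; omega
  | succ fuel ih =>
    intro l cur accs h
    match l with
    | [] => simp [PySem.Chars.splitOn.go, pvSplits, List.modifyHead]
    | c :: rest =>
      rw [PySem.Chars.splitOn.go]
      by_cases hc : c = d
      · subst hc
        rw [if_pos (by simp [List.isPrefixOf])]
        simp only [List.length_cons] at h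
        simp only [List.length_cons, List.drop_succ_cons, List.length_nil, List.drop_zero]
        rw [ih rest [] _ (by omega)]
        simp only [pvSplits, List.reverse_nil, List.modifyHead, List.nil_append,
          List.reverse_cons, List.append_assoc, List.cons_append]
        cases pvSplits c rest <;> simp
      · rw [if_neg (by simp [List.isPrefixOf]; exact fun hh => (hc hh.symm))]
        simp only [List.length_cons] at h
        rw [ih rest (c :: cur) _ (by omega)]
        simp only [pvSplits, if_neg hc, List.modifyHead_modifyHead]
        congr 1
        have hf : ((fun x => cur.reverse ++ x) ∘ fun x => c :: x)
            = (fun x => (c :: cur).reverse ++ x) := by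
          funext x; simp
        rw [hf]

theorem splitOn_single (d : Char) (s : List Char) :
    PySem.Chars.splitOn s [d] = pvSplits d s := by
  rw [PySem.Chars.splitOn, splitOn_go_single d (s.length + 1) s [] [] (by omega)]
  cases pvSplits d s <;> simp [List.modifyHead]

-- strip facts
theorem strip_cons_ws (w : Char) (h : List Char) (hw : PySem.Chars.isspace w = true) :
    PySem.Chars.strip (w :: h) = PySem.Chars.strip h := by
  simp [PySem.Chars.strip, PySem.Chars.lstrip, hw]

theorem strip_append_ws (w : Char) (h : List Char) (hw : PySem.Chars.isspace w = true) :
    PySem.Chars.strip (h ++ [w]) = PySem.Chars.strip h := by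
  simp only [PySem.Chars.strip, PySem.Chars.lstrip, PySem.Chars.rstrip, List.dropWhile_append]
  by_cases he : List.dropWhile PySem.Chars.isspace h = []
  · simp [he, hw]
  · simp only [List.isEmpty_eq_false_iff.mpr he]
    simp [List.reverse_append, hw]

theorem strip_eq_nil_iff (s : List Char) :
    PySem.Chars.strip s = [] ↔ ∀ x ∈ s, PySem.Chars.isspace x = true := by
  simp only [PySem.Chars.strip, PySem.Chars.lstrip, PySem.Chars.rstrip,
    List.reverse_eq_nil_iff, List.dropWhile_eq_nil_iff, List.mem_reverse]
  constructor
  · intro hall x hx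
    by_cases hxs : x ∈ List.dropWhile PySem.Chars.isspace s
    · exact hall x hxs
    · have := List.takeWhile_append_dropWhile (p := PySem.Chars.isspace) (l := s)
      rw [← this] at hx
      rcases List.mem_append.mp hx with h1 | h2
      · exact List.mem_takeWhile_imp h1
      · exact absurd h2 hxs
  · intro hall x hx
    exact hall x ((List.dropWhile_sublist _).subset hx)

theorem pvSplits_no_delim (d : Char) (s : List Char) (h : d ∉ s) :
    pvSplits d s = [s] := by
  induction s with
  | nil => rfl
  | cons c s ih =>
    simp only [List.mem_cons, not_or] at h
    simp [pvSplits, Ne.symm h.1, ih h.2, List.modifyHead]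

-- filterStrip of a '+'-split is invariant under stripping the chunk
theorem filterStrip_splits_lstrip (s : List Char) :
    pvFilterStrip (pvSplits '+' (PySem.Chars.lstrip s)) = pvFilterStrip (pvSplits '+' s) := by
  induction s with
  | nil => rfl
  | cons w s ih =>
    by_cases hw : PySem.Chars.isspace w = true
    · have hwp : ¬ (w = '+') := by rintro rfl; simp [PySem.Chars.isspace] at hw
      rw [show PySem.Chars.lstrip (w :: s) = PySem.Chars.lstrip s by
        simp [PySem.Chars.lstrip, hw], ih]
      simp only [pvSplits, if_neg hwp]
      cases hsp : pvSplits '+' s with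
      | nil => exact absurd hsp (pvSplits_ne_nil _ _)
      | cons a t => simp [pvFilterStrip, List.modifyHead, strip_cons_ws w a hw]
    · simp [PySem.Chars.lstrip, hw]

theorem pvSplits_append_ex (d w : Char) (hw : ¬ (w = d)) (l : List Char) :
    ∃ I t, pvSplits d l = I ++ [t] ∧ pvSplits d (l ++ [w]) = I ++ [t ++ [w]] := by
  induction l with
  | nil => exact ⟨[], [], rfl, by simp [pvSplits, hw, List.modifyHead]⟩
  | cons a l ih =>
    obtain ⟨I, t, h1, h2⟩ := ih
    by_cases ha : a = d
    · exact ⟨[] :: I, t, by simp [pvSplits, ha, h1], by simp [pvSplits, ha, h2]⟩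
    · match I with
      | [] =>
        refine ⟨[], a :: t, ?_, ?_⟩ <;> simp [pvSplits, ha, h1, h2, List.modifyHead]
      | t0 :: I' =>
        refine ⟨(a :: t0) :: I', t, ?_, ?_⟩ <;> simp [pvSplits, ha, h1, h2, List.modifyHead]

theorem filterStrip_append_ws (w : Char) (hw : PySem.Chars.isspace w = true) (l : List Char) :
    pvFilterStrip (pvSplits '+' (l ++ [w])) = pvFilterStrip (pvSplits '+' l) := by
  have hwp : ¬ (w = '+') := by rintro rfl; simp [PySem.Chars.isspace] at hw
  obtain ⟨I, t, h1, h2⟩ := pvSplits_append_ex '+' w hwp l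
  rw [h1, h2]
  simp [pvFilterStrip, strip_append_ws w t hw]

theorem rstrip_append_ws (w : Char) (hw : PySem.Chars.isspace w = true) (l : List Char) :
    PySem.Chars.rstrip (l ++ [w]) = PySem.Chars.rstrip l := by
  simp [PySem.Chars.rstrip, List.reverse_append, hw]

theorem rstrip_append_not_ws (w : Char) (hw : ¬ PySem.Chars.isspace w = true) (l : List Char) :
    PySem.Chars.rstrip (l ++ [w]) = l ++ [w] := by
  simp [PySem.Chars.rstrip, List.reverse_append, hw]

theorem filterStrip_splits_rstrip (s : List Char) :
    pvFilterStrip (pvSplits '+' (PySem.Chars.rstrip s)) = pvFilterStrip (pvSplits '+' s) := by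
  induction s using List.reverseRecOn with
  | nil => rfl
  | append_singleton l w ih =>
    by_cases hw : PySem.Chars.isspace w = true
    · rw [rstrip_append_ws w hw, ih, filterStrip_append_ws w hw]
    · rw [rstrip_append_not_ws w hw]

theorem filterStrip_splits_strip (s : List Char) :
    pvFilterStrip (pvSplits '+' (PySem.Chars.strip s)) = pvFilterStrip (pvSplits '+' s) := by
  rw [PySem.Chars.strip, filterStrip_splits_rstrip, filterStrip_splits_lstrip]

-- the two-level split collapses to the one-pass split
theorem flatMap_splits (s : List Char) :
    (pvSplits ',' s).flatMap (pvSplits '+') = pvSplitsP s := by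
  induction s with
  | nil => rfl
  | cons c s ih =>
    by_cases hc : c = ','
    · subst hc
      simp [pvSplits, pvSplitsP, pvIsDelim, ih]
    · cases hX : pvSplits ',' s with
      | nil => exact absurd hX (pvSplits_ne_nil _ _)
      | cons x0 xt =>
        rw [hX] at ih
        by_cases hp : c = '+'
        · subst hp
          simp only [pvSplits, if_neg hc, hX, List.modifyHead, List.flatMap_cons]
          simp only [pvSplits, if_pos rfl, pvSplitsP, pvIsDelim]
          simp only [List.cons_append, ← ih, List.flatMap_cons]
          simp
        · simp only [pvSplits, if_neg hc, hX, List.modifyHead, List.flatMap_cons]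
          simp only [pvSplits, if_neg hp]
          have hdelim : pvIsDelim c = false := by simp [pvIsDelim, hc, hp]
          simp only [pvSplitsP, hdelim, Bool.false_eq_true, if_neg, ← ih, List.flatMap_cons]
          cases hY : pvSplits '+' x0 with
          | nil => exact absurd hY (pvSplits_ne_nil _ _)
          | cons y0 yt => simp [List.modifyHead]

-- homomorphism facts about pvFilterStrip
theorem filterStrip_append (l1 l2 : List (List Char)) :
    pvFilterStrip (l1 ++ l2) = pvFilterStrip l1 ++ pvFilterStrip l2 := by
  simp [pvFilterStrip]

theorem filterStrip_flatMap (X : List (List Char)) (g : List Char → List (List Char)) :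
    pvFilterStrip (X.flatMap g) = X.flatMap (fun x => pvFilterStrip (g x)) := by
  induction X with
  | nil => rfl
  | cons x xt ih => simp [List.flatMap_cons, filterStrip_append, ih]

-- a chunk's contribution in A, on the char-list level
theorem inner_chunk (x : List Char) :
    (if PySem.Chars.strip x = [] then ([] : List String)
     else ((pvSplits '+' (PySem.Chars.strip x)).map PySem.Chars.strip).filter
            (fun p => p ≠ []) |>.map String.ofList)
      = pvFilterStrip (pvSplits '+' x) := by
  by_cases hx : PySem.Chars.strip x = []
  · rw [if_pos hx]
    have hall := (strip_eq_nil_iff x).mp hx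
    have hnp : '+' ∉ x := by
      intro hmem
      have := hall _ hmem
      simp [PySem.Chars.isspace] at this
    rw [pvSplits_no_delim _ _ hnp]
    simp [pvFilterStrip, hx]
  · rw [if_neg hx, ← filterStrip_splits_strip]
    rfl

-- string-level bridges
theorem ofList_eq_empty_iff (y : List Char) : String.ofList y = "" ↔ y = [] := by
  constructor
  · intro h
    have := congrArg String.toList h
    simpa using this
  · rintro rfl; rfl

theorem str_strip_ofList (y : List Char) :
    PySem.Str.strip (String.ofList y) = String.ofList (PySem.Chars.strip y) := by
  simp [PySem.Str.strip]

theorem filter_map_bridge (l : List (List Char)) :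
    (l.map (fun y => PySem.Str.strip (String.ofList y))).filter (fun p => p ≠ "")
      = ((l.map PySem.Chars.strip).filter (fun p => p ≠ [])).map String.ofList := by
  induction l with
  | nil => rfl
  | cons y l ih =>
    simp only [List.map_cons, str_strip_ofList, List.filter_cons]
    by_cases hy : PySem.Chars.strip y = []
    · simpa [hy, str_strip_ofList] using ih
    · simpa [hy, ofList_eq_empty_iff, str_strip_ofList] using ih

theorem a_side (L : List Char) :
    ((pvSplits ',' L).map String.ofList).foldl
        (fun parts chunk =>
          let c := PySem.Str.strip chunk
          if c = "" then parts
          else parts ++ (((pySplit c "+").map PySem.Str.strip).filter (fun p => p ≠ "")))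
        [] = pvFilterStrip (pvSplitsP L) := by
  have hstep : ∀ parts : List String, ∀ x : List Char,
      (let c := PySem.Str.strip (String.ofList x)
       if c = "" then parts
       else parts ++ (((pySplit c "+").map PySem.Str.strip).filter (fun p => p ≠ "")))
        = parts ++ pvFilterStrip (pvSplits '+' x) := by
    intro parts x
    rw [← inner_chunk x]
    by_cases hx : PySem.Chars.strip x = []
    · simp [str_strip_ofList, ofList_eq_empty_iff, hx]
    · simp only [str_strip_ofList]
      rw [if_neg (by simpa [ofList_eq_empty_iff] using hx), if_neg hx]
      congr 1
      rw [pySplit, show (String.ofList (PySem.Chars.strip x)).toList = PySem.Chars.strip x from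
        String.toList_ofList, show ("+" : String).toList = ['+'] from rfl,
        splitOn_single]
      rw [List.map_map]
      exact filter_map_bridge _
  have hfold : ∀ parts : List String,
      ((pvSplits ',' L).map String.ofList).foldl
        (fun parts chunk =>
          let c := PySem.Str.strip chunk
          if c = "" then parts
          else parts ++ (((pySplit c "+").map PySem.Str.strip).filter (fun p => p ≠ "")))
        parts = parts ++ (pvSplits ',' L).flatMap (fun x => pvFilterStrip (pvSplits '+' x)) := by
    generalize pvSplits ',' L = X
    induction X with
    | nil => intro parts; simp
    | cons x xt ih =>
      intro parts
      simp only [List.map_cons, List.foldl_cons, List.flatMap_cons]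
      rw [hstep parts x, ih, List.append_assoc]
  rw [hfold [], List.nil_append, ← filterStrip_flatMap, flatMap_splits]

-- one-pass side
theorem pvSplitsP_no_delim (tok : List Char) (h : ∀ c ∈ tok, pvIsDelim c = false) :
    pvSplitsP tok = [tok] := by
  induction tok with
  | nil => rfl
  | cons c tok ih =>
    have hc := h c (by simp)
    simp only [pvSplitsP, hc, Bool.false_eq_true, if_neg]
    rw [ih (fun x hx => h x (by simp [hx]))]
    simp [List.modifyHead]

theorem pvSplitsP_append_delim (tok : List Char) (c : Char) (s : List Char)
    (htok : ∀ x ∈ tok, pvIsDelim x = false) (hc : pvIsDelim c = true) :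
    pvSplitsP (tok ++ c :: s) = tok :: pvSplitsP s := by
  induction tok with
  | nil => simp [pvSplitsP, hc]
  | cons a tok ih =>
    have ha := htok a (by simp)
    simp only [List.cons_append, pvSplitsP, ha, Bool.false_eq_true, if_neg]
    rw [ih (fun x hx => htok x (by simp [hx]))]
    simp [List.modifyHead]

theorem flush_eq (parts : List String) (tok : List Char) :
    pvFlush parts tok = parts ++ pvFilterStrip [tok] := by
  by_cases h : PySem.Chars.strip tok = [] <;> simp [pvFlush, pvFilterStrip, h]

theorem b_side (L : List Char) : ∀ (parts : List String) (tok : List Char),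
    (∀ c ∈ tok, pvIsDelim c = false) →
    (let st := L.foldl pvStep (parts, tok); pvFlush st.1 st.2)
      = parts ++ pvFilterStrip (pvSplitsP (tok ++ L)) := by
  induction L with
  | nil =>
    intro parts tok htok
    simp only [List.foldl_nil, List.append_nil]
    rw [flush_eq, pvSplitsP_no_delim tok htok]
  | cons c L ih =>
    intro parts tok htok
    by_cases hc : c = ',' ∨ c = '+'
    · have hcd : pvIsDelim c = true := by
        rcases hc with h | h <;> simp [pvIsDelim, h]
      simp only [List.foldl_cons, pvStep, if_pos hc]
      rw [ih (pvFlush parts tok) [] (by simp), flush_eq,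
        pvSplitsP_append_delim tok c L htok hcd,
        show pvFilterStrip (tok :: pvSplitsP L)
            = pvFilterStrip [tok] ++ pvFilterStrip (pvSplitsP L) from
          filterStrip_append [tok] (pvSplitsP L), List.append_assoc, List.nil_append]
    · have hcd : pvIsDelim c = false := by
        simp only [not_or] at hc
        simp [pvIsDelim, hc.1, hc.2]
      simp only [List.foldl_cons, pvStep, if_neg hc]
      rw [ih parts (tok ++ [c])
        (by intro x hx
            rcases List.mem_append.mp hx with h | h
            · exact htok x h
            · simp only [List.mem_singleton] at h; subst h; exact hcd)]
      simp

theorem main_eq (t : String) :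
    (pySplit t ",").foldl
        (fun parts chunk =>
          let c := PySem.Str.strip chunk
          if c = "" then parts
          else parts ++ (((pySplit c "+").map PySem.Str.strip).filter (fun p => p ≠ "")))
        []
      = (let st := t.toList.foldl pvStep ([], []); pvFlush st.1 st.2) := by
  rw [b_side t.toList [] [] (by simp), List.nil_append, List.nil_append]
  rw [show pySplit t "," = (pvSplits ',' t.toList).map String.ofList by
    rw [pySplit, show ("," : String).toList = [','] from rfl, splitOn_single]]
  exact a_side t.toList

-- ===== VERDICT (by name: the statement is the Claim_ definition above) =====
theorem parse_component_list_spec : Claim_equal_parse_component_list := by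
  intro note_text _
  unfold Spec_parse_component_list parse_component_list parse_component_list_alt
  match note_text with
  | none => rfl
  | some s =>
    by_cases hs : s = ""
    · simp only [hs, reduceIte]
    · simp only [if_neg hs]
      exact main_eq _
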